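-- pv_equiv track=rewrite | github.com/MissionWAR/Merge-Blocklists | scripts/utils.py | is_domain_covered_by_wildcard
-- ===== SOURCE A (Python) =====
-- def is_domain_covered_by_wildcard(domain: str, wildcard_roots: set[str]) -> bool:
--     """
--     Return True if `domain` is covered by a wildcard in `wildcard_roots`.
--
--     Example:
--         wildcard_roots = {"example.com"}
--         is_domain_covered_by_wildcard("foo.example.com", wildcard_roots) -> True
--         is_domain_covered_by_wildcard("example.com", wildcard_roots) -> False
--     """
--     if not domain or not wildcard_roots or "." not in domain:
--         return False
--     parts = domain.split(".")
--     for i in range(1, len(parts)):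
--         if ".".join(parts[i:]) in wildcard_roots:
--             return True
--     return False
-- ===== SOURCE B (Python) =====
-- def is_domain_covered_by_wildcard(domain: str, wildcard_roots: set[str]) -> bool:
--     if not domain or not wildcard_roots or "." not in domain:
--         return False
--     return any(domain.endswith("." + root) for root in wildcard_roots)
-- ===== Notes on version B (the rewrite author's own statement) =====
-- stated objective: simpler
-- what changed: Instead of splitting the domain into labels and testing every joined dot-suffix for set membership, B scans the roots once and tests domain.endswith('.' + root) for each root.
import Mathlib
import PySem

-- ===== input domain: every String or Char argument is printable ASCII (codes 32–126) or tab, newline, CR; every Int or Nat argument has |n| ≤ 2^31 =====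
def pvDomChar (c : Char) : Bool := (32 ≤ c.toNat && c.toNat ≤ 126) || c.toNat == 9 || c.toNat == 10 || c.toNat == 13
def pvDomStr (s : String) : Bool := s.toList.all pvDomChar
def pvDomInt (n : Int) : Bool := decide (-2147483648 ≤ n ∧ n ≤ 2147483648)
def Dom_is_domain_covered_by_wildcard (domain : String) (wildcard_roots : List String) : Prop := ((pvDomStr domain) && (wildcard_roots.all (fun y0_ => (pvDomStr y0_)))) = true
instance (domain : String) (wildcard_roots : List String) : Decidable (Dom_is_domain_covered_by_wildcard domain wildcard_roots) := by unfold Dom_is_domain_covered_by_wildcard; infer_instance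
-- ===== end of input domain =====

-- B replaces A's split/join suffix generation by a direct endswith('.'+root) scan over the roots (simpler, not faster).

-- ===== PORT A =====
-- literal port of A: guards, split on '.', then for i in range(1, len(parts)) test '.'.join(parts[i:]) ∈ wildcard_roots
def is_domain_covered_by_wildcard (domain : String) (wildcard_roots : List String) : Bool :=
  if domain.toList.isEmpty || wildcard_roots.isEmpty || !(PySem.Chars.isIn ['.'] domain.toList) then
    false
  else
    let parts := PySem.Chars.splitOn domain.toList ['.']
    (PySem.List.pyRange 1 (parts.length : Int)).any fun i =>
      (wildcard_roots.map String.toList).contains (PySem.Chars.join ['.'] (parts.drop i.toNat))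

-- ===== PORT B =====
-- literal port of B: same guards, then any(domain.endswith('.' + root) for root in wildcard_roots)
def is_domain_covered_by_wildcard_alt (domain : String) (wildcard_roots : List String) : Bool :=
  if domain.toList.isEmpty || wildcard_roots.isEmpty || !(PySem.Chars.isIn ['.'] domain.toList) then
    false
  else
    wildcard_roots.any fun root => PySem.Chars.endswith domain.toList ('.' :: root.toList)

-- ===== PRECONDITION & SPEC =====
def Spec_is_domain_covered_by_wildcard (domain : String) (wildcard_roots : List String) (out : Bool) : Prop := out = is_domain_covered_by_wildcard_alt domain wildcard_roots
instance (domain : String) (wildcard_roots : List String) (out : Bool) : Decidable (Spec_is_domain_covered_by_wildcard domain wildcard_roots out) := by unfold Spec_is_domain_covered_by_wildcard; infer_instance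

-- ===== CLAIM (what is proved, stated in full; the proofs are below) =====
def Claim_equal_is_domain_covered_by_wildcard : Prop := ∀ (domain : String) (wildcard_roots : List String), Dom_is_domain_covered_by_wildcard domain wildcard_roots → Spec_is_domain_covered_by_wildcard domain wildcard_roots (is_domain_covered_by_wildcard domain wildcard_roots)

-- ===== LEMMAS AND PROOFS =====

-- a clean model of Python's str.split('.') on a single-character separator
def pySplitChar (c : Char) : List Char → List Char → List (List Char)
  | [], cur => [cur.reverse]
  | x :: rest, cur =>
    if x = c then cur.reverse :: pySplitChar c rest [] else pySplitChar c rest (x :: cur)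

lemma splitOn_go_spec (c : Char) : ∀ (fuel : Nat) (l cur : List Char) (acc : List (List Char)),
    l.length < fuel →
    PySem.Chars.splitOn.go [c] fuel l cur acc = acc.reverse ++ pySplitChar c l cur := by
  intro fuel
  induction fuel with
  | zero => intro l cur acc h; omega
  | succ fuel ih =>
    intro l cur acc h
    cases l with
    | nil => simp [PySem.Chars.splitOn.go, pySplitChar]
    | cons x rest =>
      by_cases hx : x = c
      · subst hx
        rw [show PySem.Chars.splitOn.go [x] (fuel+1) (x :: rest) cur acc
              = PySem.Chars.splitOn.go [x] fuel rest [] (cur.reverse :: acc) by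
            simp [PySem.Chars.splitOn.go, List.isPrefixOf]]
        rw [ih rest [] (cur.reverse :: acc) (by simpa using Nat.lt_of_succ_lt_succ h)]
        simp [pySplitChar]
      · rw [show PySem.Chars.splitOn.go [c] (fuel+1) (x :: rest) cur acc
              = PySem.Chars.splitOn.go [c] fuel rest (x :: cur) acc by
            simp [PySem.Chars.splitOn.go, List.isPrefixOf, Ne.symm hx]]
        rw [ih rest (x :: cur) acc (by simpa using Nat.lt_of_succ_lt_succ h)]
        simp [pySplitChar, hx]

lemma splitOn_eq_pySplitChar (c : Char) (cs : List Char) :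
    PySem.Chars.splitOn cs [c] = pySplitChar c cs [] := by
  unfold PySem.Chars.splitOn
  rw [splitOn_go_spec c (cs.length + 1) cs [] [] (by omega)]
  simp

lemma pySplitChar_ne_nil (c : Char) : ∀ (l cur : List Char), pySplitChar c l cur ≠ [] := by
  intro l
  induction l with
  | nil => intro cur; simp [pySplitChar]
  | cons x rest ih =>
    intro cur
    by_cases hx : x = c <;> simp [pySplitChar, hx, ih]

lemma intercalate_cons_of_ne_nil (s l : List Char) (ls : List (List Char)) (h : ls ≠ []) :
    List.intercalate s (l :: ls) = l ++ s ++ List.intercalate s ls := by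
  obtain ⟨m, ms, rfl⟩ := List.exists_cons_of_ne_nil h
  simp [List.intercalate, List.intersperse]

lemma intercalate_pySplitChar (c : Char) : ∀ (l cur : List Char),
    List.intercalate [c] (pySplitChar c l cur) = cur.reverse ++ l := by
  intro l
  induction l with
  | nil => intro cur; simp [pySplitChar, List.intercalate]
  | cons x rest ih =>
    intro cur
    by_cases hx : x = c
    · subst hx
      rw [show pySplitChar x (x :: rest) cur = cur.reverse :: pySplitChar x rest [] by
            simp [pySplitChar]]
      rw [intercalate_cons_of_ne_nil _ _ _ (pySplitChar_ne_nil x rest [])]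
      simp [ih]
    · rw [show pySplitChar c (x :: rest) cur = pySplitChar c rest (x :: cur) by
            simp [pySplitChar, hx]]
      simp [ih]

lemma pySplitChar_free (c : Char) : ∀ (l cur : List Char), c ∉ cur →
    ∀ p ∈ pySplitChar c l cur, c ∉ p := by
  intro l
  induction l with
  | nil =>
    intro cur hcur p hp
    simp [pySplitChar] at hp
    subst hp; simpa using hcur
  | cons x rest ih =>
    intro cur hcur p hp
    by_cases hx : x = c
    · subst hx
      simp [pySplitChar] at hp
      rcases hp with hp | hp
      · subst hp; simpa using hcur
      · exact ih [] (by simp) p hp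
    · simp [pySplitChar, hx] at hp
      refine ih (x :: cur) ?_ p hp
      intro h
      rcases List.mem_cons.mp h with h | h
      · exact hx h.symm
      · exact hcur h

lemma not_suffix_of_free (c : Char) (r p : List Char) (hfree : c ∉ p) :
    ¬ (c :: r) <:+ p := by
  intro h
  exact hfree (h.subset (by simp))

lemma suffix_dot_append (c : Char) (r t : List Char) :
    ∀ p : List Char, c ∉ p → ((c :: r) <:+ p ++ c :: t ↔ r = t ∨ (c :: r) <:+ t) := by
  intro p
  induction p with
  | nil =>
    intro _
    rw [List.nil_append, List.suffix_cons_iff]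
    constructor
    · rintro (h | h)
      · injection h with h1 h2
        exact Or.inl h2
      · exact Or.inr h
    · rintro (rfl | h)
      · exact Or.inl rfl
      · exact Or.inr h
  | cons y p ih =>
    intro hfree
    have hy : c ≠ y := fun h => hfree (by simp [h])
    rw [List.cons_append, List.suffix_cons_iff]
    constructor
    · rintro (h | h)
      · injection h with h1 h2
        exact absurd h1 hy
      · exact (ih (fun hm => hfree (by simp [hm]))).mp h
    · intro h
      exact Or.inr ((ih (fun hm => hfree (by simp [hm]))).mpr h)

lemma suffix_iff_drop (c : Char) (r : List Char) :
    ∀ parts : List (List Char), parts ≠ [] → (∀ p ∈ parts, c ∉ p) →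
    ((c :: r) <:+ List.intercalate [c] parts ↔
      ∃ i : Nat, 1 ≤ i ∧ i < parts.length ∧ List.intercalate [c] (parts.drop i) = r) := by
  intro parts
  induction parts with
  | nil => intro h; simp at h
  | cons p qs ih =>
    intro _ hfree
    cases qs with
    | nil =>
      rw [show List.intercalate [c] [p] = p by simp [List.intercalate]]
      constructor
      · intro h
        exact absurd h (not_suffix_of_free c r p (hfree p (by simp)))
      · rintro ⟨i, h1, h2, -⟩
        simp at h2; omega
    | cons q qs' =>
      rw [intercalate_cons_of_ne_nil _ _ _ (by simp), List.append_assoc]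
      have hsplit : ([c] ++ List.intercalate [c] (q :: qs')) = c :: List.intercalate [c] (q :: qs') := rfl
      rw [hsplit, suffix_dot_append c r _ p (hfree p (by simp))]
      rw [ih (by simp) (fun x hx => hfree x (by simp [hx]))]
      constructor
      · rintro (rfl | ⟨i, h1, h2, h3⟩)
        · exact ⟨1, by simp⟩
        · refine ⟨i + 1, by omega, by simp at h2 ⊢; omega, by simpa using h3⟩
      · rintro ⟨i, h1, h2, h3⟩
        rcases Nat.eq_or_lt_of_le h1 with rfl | hi
        · exact Or.inl (by simpa using h3.symm)
        · refine Or.inr ⟨i - 1, by omega, by simp at h2 ⊢; omega, ?_⟩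
          have : (p :: q :: qs').drop i = (q :: qs').drop (i - 1) := by
            rw [show i = (i - 1) + 1 by omega]; rfl
          rw [this] at h3
          exact h3

-- ===== VERDICT (by name: the statement is the Claim_ definition above) =====
theorem is_domain_covered_by_wildcard_spec : Claim_equal_is_domain_covered_by_wildcard := by
  intro domain wildcard_roots _
  unfold Spec_is_domain_covered_by_wildcard
  unfold is_domain_covered_by_wildcard is_domain_covered_by_wildcard_alt
  cases hg : (domain.toList.isEmpty || wildcard_roots.isEmpty || !(PySem.Chars.isIn ['.'] domain.toList)) with
  | true => simp
  | false =>
    simp only [Bool.false_eq_true, if_false]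
    rw [Bool.eq_iff_iff]
    set cs := domain.toList with hcs
    rw [splitOn_eq_pySplitChar]
    have hne := pySplitChar_ne_nil '.' cs []
    have hfree := pySplitChar_free '.' cs [] (by simp)
    have hjoin : List.intercalate ['.'] (pySplitChar '.' cs []) = cs := by
      simpa using intercalate_pySplitChar '.' cs []
    set parts := pySplitChar '.' cs [] with hparts
    simp only [List.any_eq_true, PySem.List.mem_pyRange_one, PySem.Chars.join,
      List.contains_eq_mem, List.mem_map, decide_eq_true_eq, PySem.Chars.endswith_iff]
    constructor
    · rintro ⟨i, ⟨h1, h2⟩, r, hr, hjr⟩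
      refine ⟨r, hr, ?_⟩
      rw [← hjoin]
      exact (suffix_iff_drop '.' r.toList parts hne hfree).mpr
        ⟨i.toNat, by omega, by omega, hjr.symm⟩
    · rintro ⟨r, hr, hsuf⟩
      rw [← hjoin] at hsuf
      obtain ⟨i, h1, h2, h3⟩ := (suffix_iff_drop '.' r.toList parts hne hfree).mp hsuf
      exact ⟨(i : Int), ⟨by omega, by omega⟩, r, hr, by simpa using h3.symm⟩
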